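-- pv_equiv track=rewrite | github.com/Tom-the-Bomb/aoc-2025 | aoc-py/solutions/day6.py | part_one
-- ===== SOURCE A (Python) =====
-- from math import prod
--
-- def part_one(inp: str) -> int:
--     grid = [row.split() for row in inp.splitlines()]
--     n_rows = len(grid)
--     n_cols = len(grid[0])
--
--     return sum(
--         (prod if grid[-1][j] == '*' else sum)([int(grid[i][j]) for i in range(n_rows - 1)])
--         for j in range(n_cols)
--     )
-- ===== SOURCE B (Python) =====
-- def part_one(inp: str) -> int:
--     rows = [r.split() for r in inp.splitlines()]
--     ops = rows[-1]
--     accs = [1 if op == '*' else 0 for op in ops]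
--     for row in rows[:-1]:
--         accs = [a * int(c) if op == '*' else a + int(c)
--                 for a, op, c in zip(accs, ops, row)]
--     return sum(accs)
-- ===== Notes on version B (the rewrite author's own statement) =====
-- stated objective: alternative
-- what changed: B makes a single row-major pass keeping one running accumulator per column (initialised 1 for '*' columns, 0 otherwise) instead of A's column-major pass that re-indexes every row once per column and builds each column list before reducing it.
import Mathlib
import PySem

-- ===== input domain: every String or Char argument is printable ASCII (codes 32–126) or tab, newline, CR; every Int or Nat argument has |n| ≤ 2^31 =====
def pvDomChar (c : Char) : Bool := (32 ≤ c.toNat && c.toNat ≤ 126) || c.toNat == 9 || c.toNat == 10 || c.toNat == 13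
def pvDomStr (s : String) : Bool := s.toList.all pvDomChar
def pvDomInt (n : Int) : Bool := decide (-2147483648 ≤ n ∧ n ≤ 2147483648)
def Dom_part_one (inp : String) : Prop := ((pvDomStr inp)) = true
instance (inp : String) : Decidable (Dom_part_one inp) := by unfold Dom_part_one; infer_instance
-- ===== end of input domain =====

-- B replaces A's column-major pass (re-indexing every row once per column) by a single
-- row-major pass over the data rows keeping one running accumulator per column
-- (initialised to 1 for '*' columns and 0 for sum columns); same asymptotic cost.

-- ===== PORT A =====
def part_one (inp : String) : Int :=
  let grid : List (List String) := (PySem.Str.splitlines inp).map PySem.Str.split₀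
  let n_rows : Int := grid.length
  let n_cols : Int := (PySem.List.pyGetD grid 0 []).length
  ((PySem.List.pyRange 0 n_cols 1).map (fun j =>
    let col : List Int := (PySem.List.pyRange 0 (n_rows - 1) 1).map (fun i =>
      (PySem.Int.ofStr? (PySem.List.pyGetD (PySem.List.pyGetD grid i []) j "")).getD 0)
    if PySem.List.pyGetD (PySem.List.pyGetD grid (-1) []) j "" = "*" then col.prod
    else col.sum)).sum

-- ===== PORT B =====
def part_one_alt (inp : String) : Int :=
  let rows : List (List String) := (PySem.Str.splitlines inp).map PySem.Str.split₀
  let ops : List String := PySem.List.pyGetD rows (-1) []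
  let accs0 : List Int := ops.map (fun op => if op = "*" then (1 : Int) else 0)
  let accs : List Int := (PySem.List.slice rows none (some (-1))).foldl
    (fun accs row =>
      (accs.zip (ops.zip row)).map (fun p =>
        if p.2.1 = "*" then p.1 * (PySem.Int.ofStr? p.2.2).getD 0
        else p.1 + (PySem.Int.ofStr? p.2.2).getD 0)) accs0
  accs.sum

-- ===== PRECONDITION & SPEC =====
-- Pre_ is exactly where the Python A returns: a non-empty grid whose first row is no longer
-- than any other row (else grid[-1][j]/grid[i][j] raises IndexError) and whose data cells in
-- the first len(grid[0]) columns all parse as ints (else int() raises ValueError).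
def Pre_part_one (inp : String) : Prop :=
  let grid : List (List String) := (PySem.Str.splitlines inp).map PySem.Str.split₀
  grid ≠ [] ∧ (∀ r ∈ grid, (grid.headD []).length ≤ r.length) ∧
    (∀ r ∈ grid.dropLast, ∀ c ∈ r.take (grid.headD []).length,
      (PySem.Int.ofStr? c).isSome = true)
instance (inp : String) : Decidable (Pre_part_one inp) := by unfold Pre_part_one; infer_instance

def pvWitness_part_one : String := "1 2\n3 4\n+ *"

def Spec_part_one (inp : String) (out : Int) : Prop := out = part_one_alt inp
instance (inp : String) (out : Int) : Decidable (Spec_part_one inp out) := by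
  unfold Spec_part_one; infer_instance

-- ===== CLAIM (what is proved, stated in full; the proofs are below) =====
def Claim_equal_part_one : Prop :=
  ∀ (inp : String), Dom_part_one inp → Pre_part_one inp → Spec_part_one inp (part_one inp)

-- ===== LEMMAS AND PROOFS =====

-- let-free views of the two port bodies (definitionally equal to them)
def pvA (grid : List (List String)) : Int :=
  ((PySem.List.pyRange 0 ((PySem.List.pyGetD grid 0 []).length : Int) 1).map (fun j =>
    let col : List Int := (PySem.List.pyRange 0 ((grid.length : Int) - 1) 1).map (fun i =>
      (PySem.Int.ofStr? (PySem.List.pyGetD (PySem.List.pyGetD grid i []) j "")).getD 0)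
    if PySem.List.pyGetD (PySem.List.pyGetD grid (-1) []) j "" = "*" then col.prod
    else col.sum)).sum

def pvB (grid : List (List String)) : Int :=
  ((PySem.List.slice grid none (some (-1))).foldl
    (fun accs row =>
      (accs.zip ((PySem.List.pyGetD grid (-1) []).zip row)).map (fun p =>
        if p.2.1 = "*" then p.1 * (PySem.Int.ofStr? p.2.2).getD 0
        else p.1 + (PySem.Int.ofStr? p.2.2).getD 0))
    ((PySem.List.pyGetD grid (-1) []).map (fun op => if op = "*" then (1 : Int) else 0))).sum

lemma part_one_eq (inp : String) :
    part_one inp = pvA ((PySem.Str.splitlines inp).map PySem.Str.split₀) := rfl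

lemma part_one_alt_eq (inp : String) :
    part_one_alt inp = pvB ((PySem.Str.splitlines inp).map PySem.Str.split₀) := rfl

-- a map over range of positional getD is the map over the list itself
lemma pv_map_range_getD {α β : Type} (l : List α) (f : α → β) (d : α) :
    (List.range l.length).map (fun i => f (l.getD i d)) = l.map f := by
  apply List.ext_getElem
  · simp
  · intro i h1 h2
    simp only [List.getElem_map, List.getElem_range]
    have hi : i < l.length := by simpa using h2
    rw [List.getD_eq_getElem l d hi]

-- one step of B's row-major loop, evaluated positionally
lemma pv_step_eval (ops : List String) (accs : List Int) (row : List String) :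
    (accs.zip (ops.zip row)).map (fun p =>
        if p.2.1 = "*" then p.1 * (PySem.Int.ofStr? p.2.2).getD 0
        else p.1 + (PySem.Int.ofStr? p.2.2).getD 0)
      = (List.range (min accs.length (min ops.length row.length))).map (fun j =>
          if ops.getD j "" = "*" then accs.getD j 0 * (PySem.Int.ofStr? (row.getD j "")).getD 0
          else accs.getD j 0 + (PySem.Int.ofStr? (row.getD j "")).getD 0) := by
  apply List.ext_getElem
  · simp
  · intro i h1 h2
    simp only [List.length_map, List.length_zip, List.length_range] at h1 h2
    simp only [List.getElem_map, List.getElem_zip, List.getElem_range]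
    rw [List.getD_eq_getElem accs 0 (by omega), List.getD_eq_getElem ops "" (by omega),
        List.getD_eq_getElem row "" (by omega)]

-- B's fold over the data rows computes, per column, A's column reduction
lemma pv_foldl_step (ops : List String) (L : Nat) (hops : L ≤ ops.length) :
    ∀ (data : List (List String)) (accs : List Int), accs.length = L →
      (∀ r ∈ data, L ≤ r.length) →
      data.foldl (fun accs row =>
        (accs.zip (ops.zip row)).map (fun p =>
          if p.2.1 = "*" then p.1 * (PySem.Int.ofStr? p.2.2).getD 0
          else p.1 + (PySem.Int.ofStr? p.2.2).getD 0)) accs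
      = (List.range L).map (fun j =>
          if ops.getD j "" = "*" then
            accs.getD j 0 * (data.map (fun r => (PySem.Int.ofStr? (r.getD j "")).getD 0)).prod
          else
            accs.getD j 0 + (data.map (fun r => (PySem.Int.ofStr? (r.getD j "")).getD 0)).sum) := by
  intro data
  induction data with
  | nil =>
      intro accs ha _
      subst ha
      simp only [List.foldl_nil, List.map_nil, List.prod_nil, List.sum_nil, mul_one, add_zero,
        ite_self]
      have h : (List.range accs.length).map (fun i => accs.getD i 0) = accs := by
        simpa using pv_map_range_getD accs (fun a => a) 0
      exact h.symm
  | cons r rest ih =>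
      intro accs ha hrows
      have hr : L ≤ r.length := hrows r (by simp)
      have hmin : min accs.length (min ops.length r.length) = L := by omega
      rw [List.foldl_cons, pv_step_eval ops accs r, hmin,
          ih _ (by simp) (fun r' hr' => hrows r' (by simp [hr']))]
      apply List.map_congr_left
      intro j hj
      simp only [List.mem_range] at hj
      rw [PySem.List.getD_map_range _ L j 0 hj]
      simp only [List.map_cons, List.prod_cons, List.sum_cons]
      by_cases hop : ops.getD j "" = "*"
      · rw [if_pos hop, if_pos hop, if_pos hop, mul_assoc]
      · rw [if_neg hop, if_neg hop, if_neg hop, add_assoc]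

-- A's inner comprehension over row indices is the map over the data rows
lemma pv_colA (data : List (List String)) (ops : List String) (j : Nat) :
    (PySem.List.pyRange 0 (((data ++ [ops]).length : Int) - 1)).map (fun i =>
      (PySem.Int.ofStr? (PySem.List.pyGetD (PySem.List.pyGetD (data ++ [ops]) i []) (j : Int) "")).getD 0)
    = data.map (fun r => (PySem.Int.ofStr? (r.getD j "")).getD 0) := by
  have hrows1 : (((data ++ [ops]).length : Int)) - 1 = (data.length : Int) := by simp
  rw [hrows1, PySem.List.pyRange_one 0 (data.length : Int), List.map_map]
  have hdt : (((data.length : Int)) - 0).toNat = data.length := by omega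
  rw [hdt]
  calc (List.range data.length).map _
      = (List.range data.length).map
          (fun k => (PySem.Int.ofStr? ((data.getD k []).getD j "")).getD 0) := by
        apply List.map_congr_left
        intro k hk
        have hkl : k < data.length := List.mem_range.mp hk
        simp only [Function.comp_apply, zero_add]
        rw [PySem.List.pyGetD_natCast (data ++ [ops]) k [], PySem.List.pyGetD_natCast _ j ""]
        have hgk : (data ++ [ops]).getD k [] = data.getD k [] := by
          rw [List.getD_eq_getElem (data ++ [ops]) [] (n := k) (by simp; omega),
              List.getD_eq_getElem data [] (n := k) hkl]
          exact List.getElem_append_left hkl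
        rw [hgk]
    _ = data.map (fun r => (PySem.Int.ofStr? (r.getD j "")).getD 0) :=
        pv_map_range_getD data (fun r => (PySem.Int.ofStr? (r.getD j "")).getD 0) []

-- B's initial accumulator, per column
lemma pv_accs0 (ops : List String) (j : Nat) (hj : j < ops.length) :
    (ops.map (fun op => if op = "*" then (1 : Int) else 0)).getD j 0
      = (if ops.getD j "" = "*" then (1 : Int) else 0) := by
  rw [List.getD_eq_getElem _ 0 (by simp; omega), List.getElem_map,
      List.getD_eq_getElem ops "" (by omega)]

-- the heart of the equivalence, on an explicit data-rows/operator-row decomposition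
lemma pv_main (data : List (List String)) (ops : List String)
    (hlen : ∀ r ∈ data ++ [ops], ((data ++ [ops]).headD []).length ≤ r.length) :
    pvA (data ++ [ops]) = pvB (data ++ [ops]) := by
  have hlast : PySem.List.pyGetD (data ++ [ops]) (-1) [] = ops := by
    simp [PySem.List.pyGetD, PySem.List.pyGet?, PySem.List.pyIdx?]
  have hslice : PySem.List.slice (data ++ [ops]) none (some (-1)) = data := by
    rw [PySem.List.slice_to_neg_one]; simp
  unfold pvA pvB
  cases data with
  | nil =>
      simp only [List.nil_append] at hlast hslice ⊢
      have hnc : (PySem.List.pyGetD [ops] 0 []).length = ops.length := by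
        simp [PySem.List.pyGetD, PySem.List.pyGet?, PySem.List.pyIdx?]
      have hr1 : (([ops].length : Int)) - 1 = 0 := by simp
      simp only [hlast, hslice, hnc, hr1, List.foldl_nil]
      have hr0 : PySem.List.pyRange 0 0 = ([] : List Int) := by
        rw [PySem.List.pyRange_one]; simp
      rw [hr0]
      simp only [List.map_nil, List.prod_nil, List.sum_nil]
      rw [PySem.List.pyRange_one 0 (ops.length : Int), List.map_map]
      have ht : (((ops.length : Int)) - 0).toNat = ops.length := by omega
      rw [ht]
      have hpt : ∀ k ∈ List.range ops.length,
          ((fun j => if PySem.List.pyGetD ops j "" = "*" then (1 : Int) else 0) ∘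
            (fun k : Nat => (0 : Int) + (k : Int))) k
          = (fun op => if op = "*" then (1 : Int) else 0) (ops.getD k "") := by
        intro k _
        simp only [Function.comp_apply, zero_add]
        rw [PySem.List.pyGetD_natCast ops k ""]
      rw [List.map_congr_left hpt, pv_map_range_getD ops (fun op => if op = "*" then (1 : Int) else 0) ""]
  | cons r0 rest =>
      have hL0 : ((r0 :: rest ++ [ops]).headD []) = r0 := by simp
      rw [hL0] at hlen
      have hops : r0.length ≤ ops.length := hlen ops (by simp)
      have hrest : ∀ r ∈ rest, r0.length ≤ r.length := fun r hr => hlen r (by simp [hr])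
      have hnc : (PySem.List.pyGetD (r0 :: rest ++ [ops]) 0 []).length = r0.length := by
        have h0 : (0 : Int) ≤ (rest.length : Int) + 1 := by positivity
        simp [PySem.List.pyGetD, PySem.List.pyGet?, PySem.List.pyIdx?, h0]
      have hslice' : PySem.List.slice (r0 :: rest ++ [ops]) none (some (-1)) = r0 :: rest := by
        simpa using hslice
      have hlast' : PySem.List.pyGetD (r0 :: rest ++ [ops]) (-1) [] = ops := by
        simpa using hlast
      simp only [hlast', hslice', hnc, List.foldl_cons]
      have hmin : min (ops.map (fun op => if op = "*" then (1 : Int) else 0)).length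
          (min ops.length r0.length) = r0.length := by simp; omega
      rw [pv_step_eval ops (ops.map (fun op => if op = "*" then (1 : Int) else 0)) r0, hmin,
          pv_foldl_step ops r0.length hops rest _ (by simp) hrest]
      rw [PySem.List.pyRange_one 0 (r0.length : Int), List.map_map]
      have ht : (((r0.length : Int)) - 0).toNat = r0.length := by omega
      rw [ht]
      apply congrArg List.sum
      apply List.map_congr_left
      intro j hj
      have hjL : j < r0.length := List.mem_range.mp hj
      simp only [Function.comp_apply, zero_add]
      rw [PySem.List.pyGetD_natCast ops j ""]
      rw [pv_colA (r0 :: rest) ops j]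
      rw [PySem.List.getD_map_range _ r0.length j 0 hjL,
          pv_accs0 ops j (by omega)]
      simp only [List.map_cons, List.prod_cons, List.sum_cons]
      by_cases hop : ops.getD j "" = "*"
      · rw [if_pos hop, if_pos hop, if_pos hop, if_pos hop, one_mul]
      · rw [if_neg hop, if_neg hop, if_neg hop, if_neg hop, zero_add]

-- ===== VERDICT (by name: the statement is the Claim_ definition above) =====
theorem part_one_spec : Claim_equal_part_one := by
  intro inp _ hpre
  obtain ⟨hne, hlen, -⟩ := hpre
  unfold Spec_part_one
  rw [part_one_eq, part_one_alt_eq]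
  obtain ⟨data, ops, hsplit⟩ :
      ∃ d o, (PySem.Str.splitlines inp).map PySem.Str.split₀ = d ++ [o] :=
    ⟨_, _, (List.dropLast_append_getLast hne).symm⟩
  rw [hsplit] at hlen ⊢
  exact pv_main data ops hlen
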